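-- pv_equiv track=rewrite | github.com/brassogre/prover9nudge | information.py | tallyTokens
-- ===== SOURCE A (Python) =====
-- def uniqueTokens(d):
--     """Takes as input a token-dictionary d, and returns a set of every
--     distinct token appearing somewhere in d's values."""
--     allTokens = set([])
--     for k in d:
--         allTokens |= set(d[k]) #  Add d[k]'s tokens to allTokens
--     return allTokens
--
-- def tallyTokens(d):
--     """Takes as input a token-dictionary d, and returns a dictionary
--        where each key k is a token in one of d's sequences and each value of k
--        is an int representing the total number of occurrences of the token k
--        appearing in d's sequences."""
--     allTokens = uniqueTokens(d)
--     tally = {}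
--     for token in allTokens:
--         tally[token] = 0
--     for k in d:
--         for token in d[k]:
--             tally[token] += 1
--     return tally
-- ===== SOURCE B (Python) =====
-- def tallyTokens(d):
--     """Flatten all token sequences into one list, then build the result as a
--     dict comprehension mapping each token to its total count in that list
--     (duplicate comprehension keys overwrite with the same value, so insertion
--     order is first-occurrence order)."""
--     toks = [t for ts in d.values() for t in ts]
--     return {t: toks.count(t) for t in toks}
-- ===== Notes on version B (the rewrite author's own statement) =====
-- stated objective: alternative
-- what changed: Replaced A's incremental counting (build unique-token set, zero-initialize a tally, then increment tally[token] per occurrence) with a flatten-then-comprehension approach: concatenate all token lists once and map each token to toks.count(token), with no mutable counter updates at all.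
import Mathlib
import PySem

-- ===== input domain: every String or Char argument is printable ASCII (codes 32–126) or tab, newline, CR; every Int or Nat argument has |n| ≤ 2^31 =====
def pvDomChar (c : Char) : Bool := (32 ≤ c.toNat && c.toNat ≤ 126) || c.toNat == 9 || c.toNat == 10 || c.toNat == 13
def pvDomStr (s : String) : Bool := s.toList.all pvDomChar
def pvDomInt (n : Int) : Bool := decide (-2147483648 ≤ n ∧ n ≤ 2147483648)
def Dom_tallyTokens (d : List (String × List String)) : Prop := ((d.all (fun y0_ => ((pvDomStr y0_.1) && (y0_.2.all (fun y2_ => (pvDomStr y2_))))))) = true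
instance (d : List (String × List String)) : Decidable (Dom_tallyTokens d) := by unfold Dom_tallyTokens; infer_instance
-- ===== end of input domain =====

-- B replaces A's incremental counting (unique set, zero-init, increment per occurrence) with a
-- flatten-then-comprehension form: one flattened token list, each token mapped to its list.count.

-- ===== PORT A =====
-- helper: A's `uniqueTokens(d)` — `allTokens |= set(d[k])` for each key k (d[k] = first-match lookup)
def uniqueTokens (d : List (String × List String)) : PySem.Set String :=
  d.foldl (fun s p => PySem.Set.union s (PySem.Set.ofList ((PySem.Dict.mk d).getD p.1 []))) PySem.Set.empty

def tallyTokens (d : List (String × List String)) : List (String × Int) :=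
  let allTokens := uniqueTokens d
  let tally0 : PySem.Dict String Int := allTokens.foldl (fun t tok => t.insert tok 0) PySem.Dict.empty
  let tally := d.foldl (fun t p =>
      ((PySem.Dict.mk d).getD p.1 []).foldl (fun t tok => t.insert tok (t.getD tok 0 + 1)) t) tally0
  tally.items

-- ===== PORT B =====
def tallyTokens_alt (d : List (String × List String)) : List (String × Int) :=
  let toks := d.flatMap Prod.snd  -- [t for ts in d.values() for t in ts]
  -- {t: toks.count(t) for t in toks}: a dict comprehension is a fold of inserts
  (toks.foldl (fun t tok => t.insert tok ((toks.count tok : Int))) PySem.Dict.empty).items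

-- ===== PRECONDITION & SPEC =====
-- A Python dict always has distinct keys; the association-list encoding also admits duplicate keys,
-- on which A (looks tokens up via d[k] = first match) and B (reads each pair's own value) would read
-- different token lists — no Python-reachable input is excluded.
def Pre_tallyTokens (d : List (String × List String)) : Prop := (d.map Prod.fst).Nodup
instance (d : List (String × List String)) : Decidable (Pre_tallyTokens d) := by unfold Pre_tallyTokens; infer_instance
def pvWitness_tallyTokens : (List (String × List String)) := [("a", ["x", "y", "x"]), ("b", ["y"])]
def Spec_tallyTokens (d : List (String × List String)) (out : List (String × Int)) : Prop := out = tallyTokens_alt d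
instance (d : List (String × List String)) (out : List (String × Int)) : Decidable (Spec_tallyTokens d out) := by unfold Spec_tallyTokens; infer_instance

-- ===== CLAIM (what is proved, stated in full; the proofs are below) =====
def Claim_equal_tallyTokens : Prop := ∀ (d : List (String × List String)), Dom_tallyTokens d → Pre_tallyTokens d → Spec_tallyTokens d (tallyTokens d)

-- ===== LEMMAS AND PROOFS =====

theorem foldl_nested (l : List (String × List String)) (g : PySem.Dict String Int → String → PySem.Dict String Int) (t : PySem.Dict String Int) :
    l.foldl (fun t p => p.2.foldl g t) t = (l.flatMap Prod.snd).foldl g t := by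
  induction l generalizing t with
  | nil => rfl
  | cons p l ih => simp [List.foldl_append, ih]

theorem foldl_update (l : List (String × List String)) (s : PySem.Set String) :
    l.foldl (fun s p => PySem.Set.update s p.2) s = PySem.Set.update s (l.flatMap Prod.snd) := by
  induction l generalizing s with
  | nil => rfl
  | cons p l ih => simp [ih, PySem.Set.update_append]

theorem update_self (s : PySem.Set String) (l : List String) (h : ∀ x ∈ l, x ∈ s) :
    PySem.Set.update s l = s := by
  rw [PySem.Set.update_eq_append_filter]
  have h0 : (PySem.Set.ofList l).filter (fun y => !(PySem.Set.contains s y)) = [] := by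
    apply List.filter_eq_nil_iff.mpr
    intro a ha
    simp only [PySem.Set.contains_eq_listContains, Bool.not_eq_true']
    simp only [PySem.Set.mem_ofList] at ha
    simpa using h a ha
  rw [h0, List.append_nil]

theorem update_ofList (s : PySem.Set String) (l : List String) :
    PySem.Set.update s (PySem.Set.ofList l) = PySem.Set.update s l := by
  rw [PySem.Set.update_eq_append_filter, PySem.Set.update_eq_append_filter, PySem.Set.ofList_ofList]

theorem T0_items (L : List String) :
    ((PySem.Set.ofList L).foldl (fun t tok => t.insert tok (0:Int)) PySem.Dict.empty).items
      = (PySem.Set.ofList L).map (fun tok => (tok, (0:Int))) := by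
  have := PySem.Dict.items_foldl_insert_fresh (l := PySem.Set.ofList L) (k := id)
    (v := fun _ => (0:Int)) (d := (PySem.Dict.empty : PySem.Dict String Int))
    (by intro a _; simp [PySem.Dict.contains_empty]) (by simp [PySem.Set.nodup_ofList (xs := L)])
  simpa using this

theorem T0_keys (L : List String) :
    ((PySem.Set.ofList L).foldl (fun t tok => t.insert tok (0:Int)) PySem.Dict.empty).keys
      = PySem.Set.ofList L := by
  rw [PySem.Dict.keys_foldl_insert]
  rw [PySem.Dict.keys_empty, PySem.Set.update_nil_left, PySem.Set.ofList_ofList]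

theorem T0_getD (L : List String) (v : String) :
    ((PySem.Set.ofList L).foldl (fun t tok => t.insert tok (0:Int)) PySem.Dict.empty).getD v 0 = 0 := by
  set T0 := (PySem.Set.ofList L).foldl (fun t tok => t.insert tok (0:Int)) PySem.Dict.empty with hT0
  by_cases hc : T0.contains v
  · have hk : T0.keys.Nodup := PySem.Dict.nodup_keys_foldl_insert _ _ _ (by simp)
    have hv : (v, (0:Int)) ∈ T0.items := by
      rw [hT0, T0_items]
      have hm : v ∈ T0.keys := (PySem.Dict.contains_iff_mem_keys _ _).1 hc
      rw [hT0, T0_keys] at hm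
      exact List.mem_map.2 ⟨v, hm, rfl⟩
    exact PySem.Dict.getD_of_mem_items _ hv hk 0
  · exact PySem.Dict.getD_of_not_contains T0 0 (by simpa using hc)

theorem count_fold_items (L : List String) (T0 : PySem.Dict String Int)
    (hkeys : T0.keys = PySem.Set.ofList L) (hnd : T0.keys.Nodup)
    (hz : ∀ v, T0.getD v 0 = 0) :
    (L.foldl (fun t tok => t.insert tok (t.getD tok 0 + 1)) T0).items
      = (PySem.Set.ofList L).map (fun k => (k, (L.count k : Int))) := by
  set T := L.foldl (fun t tok => t.insert tok (t.getD tok 0 + 1)) T0 with hT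
  have hndT : T.keys.Nodup := PySem.Dict.nodup_keys_foldl_insert _ _ _ hnd
  have hkT : T.keys = PySem.Set.ofList L := by
    rw [hT, PySem.Dict.keys_foldl_insert, hkeys]
    exact update_self _ _ (by intro x hx; simp [PySem.Set.mem_ofList, hx])
  rw [PySem.Dict.items_eq_map_keys T hndT 0, hkT]
  apply List.map_congr_left
  intro k hk
  have h1 : T.getD k 0 = T0.getD k 0 + L.count k := PySem.Dict.getD_foldl_insert_add_one _ _ _
  simp [h1, hz]

-- B-side: a fold of inserts whose value depends only on the key
theorem getD_foldl_insert_fun (L : List String) (f : String → Int) (t : PySem.Dict String Int) (k : String) :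
    (L.foldl (fun t tok => t.insert tok (f tok)) t).getD k 0
      = if k ∈ L then f k else t.getD k 0 := by
  induction L generalizing t with
  | nil => simp
  | cons a L ih =>
    rw [List.foldl_cons, ih]
    by_cases hL : k ∈ L
    · simp [hL]
    · by_cases hk : k = a
      · simp [hk, PySem.Dict.getD_insert_self]
      · simp [hL, hk, PySem.Dict.getD_insert]

theorem B_items (L : List String) :
    (L.foldl (fun t tok => t.insert tok ((L.count tok : Int))) PySem.Dict.empty).items
      = (PySem.Set.ofList L).map (fun k => (k, (L.count k : Int))) := by
  set T := L.foldl (fun t tok => t.insert tok ((L.count tok : Int))) PySem.Dict.empty with hT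
  have hndT : T.keys.Nodup := PySem.Dict.nodup_keys_foldl_insert _ _ _ (by simp)
  have hkT : T.keys = PySem.Set.ofList L := by
    rw [hT, PySem.Dict.keys_foldl_insert, PySem.Dict.keys_empty, PySem.Set.update_nil_left]
  rw [PySem.Dict.items_eq_map_keys T hndT 0, hkT]
  apply List.map_congr_left
  intro k hk
  have hkL : k ∈ L := (PySem.Set.mem_ofList _ _).1 hk
  rw [hT, getD_foldl_insert_fun, if_pos hkL]

theorem lookup_eq_snd (d : List (String × List String)) (h : (d.map Prod.fst).Nodup)
    (p : String × List String) (hp : p ∈ d) : (PySem.Dict.mk d).getD p.1 [] = p.2 := by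
  have hk : (PySem.Dict.mk d).keys.Nodup := by simpa [PySem.Dict.keys_mk] using h
  have hi : (p.1, p.2) ∈ (PySem.Dict.mk d).items := by simpa using hp
  exact PySem.Dict.getD_of_mem_items _ hi hk []

theorem main_eq (d : List (String × List String)) (h : (d.map Prod.fst).Nodup) :
    tallyTokens d = tallyTokens_alt d := by
  have hU : uniqueTokens d = PySem.Set.ofList (d.flatMap Prod.snd) := by
    show d.foldl (fun s p => PySem.Set.update s (PySem.Set.ofList ((PySem.Dict.mk d).getD p.1 []))) [] = _
    have h1 : d.foldl (fun s p => PySem.Set.update s (PySem.Set.ofList ((PySem.Dict.mk d).getD p.1 []))) []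
        = d.foldl (fun s p => PySem.Set.update s p.2) [] :=
      PySem.List.foldl_congr_mem d _ _ _ (fun a p hp => by
        rw [lookup_eq_snd d h p hp, update_ofList])
    rw [h1, foldl_update]
    exact PySem.Set.update_nil_left _
  have h2 : ∀ t0 : PySem.Dict String Int,
      d.foldl (fun t p => ((PySem.Dict.mk d).getD p.1 []).foldl
          (fun t tok => t.insert tok (t.getD tok 0 + 1)) t) t0
        = d.foldl (fun t p => p.2.foldl (fun t tok => t.insert tok (t.getD tok 0 + 1)) t) t0 :=
    fun t0 => PySem.List.foldl_congr_mem d _ _ _ (fun a p hp => by rw [lookup_eq_snd d h p hp])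
  unfold tallyTokens
  dsimp only
  rw [h2, foldl_nested, hU]
  rw [count_fold_items (d.flatMap Prod.snd) _ (T0_keys _) (by rw [T0_keys]; exact PySem.Set.nodup_ofList (xs := d.flatMap Prod.snd)) (T0_getD _)]
  unfold tallyTokens_alt
  dsimp only
  rw [B_items]

-- ===== VERDICT (by name: the statement is the Claim_ definition above) =====
theorem tallyTokens_spec : Claim_equal_tallyTokens := fun d _ h => main_eq d h
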